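-- pv_equiv track=rewrite | github.com/imprisonedmind/aoc24 | day-7/part_1.py | create_set_of_totals
-- ===== SOURCE A (Python) =====
-- from itertools import product
--
-- def build_operators_list(numbers):
--     """Create all the possible operators"""
--     n = len(numbers)
--     if n < 2:
--         return []
--     return list(product(['+', '*'], repeat=n - 1))
--
-- def evaluate_left_to_right(numbers, operators, target):
--     """using the relative operator eval it with Left and Right values"""
--     result = numbers[0]
--     for i in range(len(operators)):
--         if operators[i] == '+':
--             result += numbers[i + 1]
--         elif operators[i] == '*':
--             result *= numbers[i + 1]
--     if result > target:
--         pass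
--     return result
--
-- def create_set_of_totals(one_to_many):
--     """
--         Loop through our numbers and eval numbers against operators and add a matching
--         total to a set
--     """
--     sum_totals = set()
--     for numbers in one_to_many:
--         total = numbers[0]
--         equations = numbers[1]
--
--         operator_combinations = build_operators_list(equations)
--         for operators in operator_combinations:
--             if evaluate_left_to_right(equations, operators, total) == total:
--                 sum_totals.add(total)
--
--     return sum_totals
-- ===== SOURCE B (Python) =====
-- def create_set_of_totals(one_to_many):
--     """DP over the set of reachable left-to-right partial values (no operator-tuple enumeration)."""
--     sum_totals = set()
--     for total, nums in one_to_many: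
--         if len(nums) < 2:
--             continue
--         vals = {nums[0]}
--         for x in nums[1:]:
--             vals = {v + x for v in vals} | {v * x for v in vals}
--         if total in vals:
--             sum_totals.add(total)
--     return sum_totals
-- ===== Notes on version B (the rewrite author's own statement) =====
-- stated objective: alternative
-- what changed: B replaces A's enumeration of all 2^(n-1) operator tuples (each re-evaluated left-to-right) with a forward DP over the deduplicated set of reachable partial values.
import Mathlib
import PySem

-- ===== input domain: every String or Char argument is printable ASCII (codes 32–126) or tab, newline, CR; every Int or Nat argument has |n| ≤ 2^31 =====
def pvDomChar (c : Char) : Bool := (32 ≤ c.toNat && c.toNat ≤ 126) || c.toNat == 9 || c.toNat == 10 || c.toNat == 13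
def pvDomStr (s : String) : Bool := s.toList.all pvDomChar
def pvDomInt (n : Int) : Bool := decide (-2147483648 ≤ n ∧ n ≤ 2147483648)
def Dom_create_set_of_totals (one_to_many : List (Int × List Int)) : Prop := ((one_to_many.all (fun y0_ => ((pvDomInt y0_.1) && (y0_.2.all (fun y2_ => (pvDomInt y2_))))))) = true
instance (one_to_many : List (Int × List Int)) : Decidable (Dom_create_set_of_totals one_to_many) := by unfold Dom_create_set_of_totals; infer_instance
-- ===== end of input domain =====

-- B replaces A's enumeration of all 2^(n-1) operator tuples with a forward DP over the
-- deduplicated set of reachable partial values (objective: alternative algorithm).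

-- ===== PORT A =====
-- itertools.product(['+','*'], repeat=k): first coordinate varies slowest
def pvProds : Nat → List (List String)
  | 0 => [[]]
  | k + 1 => (["+", "*"]).flatMap (fun x => (pvProds k).map (fun r => x :: r))

def build_operators_list (numbers : List Int) : List (List String) :=
  if numbers.length < 2 then [] else pvProds (numbers.length - 1)

-- at A's call sites the indices are always in range, so pyGetD's defaults are never used
def evaluate_left_to_right (numbers : List Int) (operators : List String) (_target : Int) : Int :=
  (PySem.List.pyRange 0 operators.length 1).foldl
    (fun result i =>
      if PySem.List.pyGetD operators i "" = "+" then result + PySem.List.pyGetD numbers (i + 1) 0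
      else if PySem.List.pyGetD operators i "" = "*" then result * PySem.List.pyGetD numbers (i + 1) 0
      else result)
    (PySem.List.pyGetD numbers 0 0)

def create_set_of_totals (one_to_many : List (Int × List Int)) : List Int :=
  one_to_many.foldl
    (fun sum_totals numbers =>
      let total := numbers.1
      let equations := numbers.2
      (build_operators_list equations).foldl
        (fun s operators =>
          if evaluate_left_to_right equations operators total = total
          then PySem.Set.add s total else s)
        sum_totals)
    PySem.Set.empty

-- ===== PORT B =====
-- {v + x for v in vals} | {v * x for v in vals}
def pvStep (vals : PySem.Set Int) (x : Int) : PySem.Set Int :=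
  PySem.Set.union (PySem.Set.ofList (vals.map (fun v => v + x))) (vals.map (fun v => v * x))

def create_set_of_totals_alt (one_to_many : List (Int × List Int)) : List Int :=
  one_to_many.foldl
    (fun sum_totals p =>
      match p.2 with
      | a :: x :: rest =>
          let vals := (x :: rest).foldl pvStep (PySem.Set.ofList [a])
          if vals.contains p.1 then PySem.Set.add sum_totals p.1 else sum_totals
      | _ => sum_totals)
    PySem.Set.empty

-- ===== PRECONDITION & SPEC =====
def Spec_create_set_of_totals (one_to_many : List (Int × List Int)) (out : List Int) : Prop := out = create_set_of_totals_alt one_to_many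
instance (one_to_many : List (Int × List Int)) (out : List Int) : Decidable (Spec_create_set_of_totals one_to_many out) := by unfold Spec_create_set_of_totals; infer_instance

-- ===== CLAIM (what is proved, stated in full; the proofs are below) =====
def Claim_equal_create_set_of_totals : Prop := ∀ (one_to_many : List (Int × List Int)), Dom_create_set_of_totals one_to_many → Spec_create_set_of_totals one_to_many (create_set_of_totals one_to_many)

-- ===== LEMMAS AND PROOFS =====

-- one left-to-right application of an operator symbol
def pvApply (op : String) (r x : Int) : Int :=
  if op = "+" then r + x else if op = "*" then r * x else r

def pvChain (init : Int) (ops : List String) (xs : List Int) : Int :=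
  (ops.zip xs).foldl (fun r p => pvApply p.1 r p.2) init

lemma pvProds_mem : ∀ (k : Nat) (ops : List String),
    ops ∈ pvProds k ↔ ops.length = k ∧ ∀ o ∈ ops, o = "+" ∨ o = "*" := by
  intro k
  induction k with
  | zero => intro ops; simp [pvProds]; rintro rfl; simp
  | succ k ih =>
    intro ops
    constructor
    · intro h
      simp only [pvProds, List.mem_flatMap, List.mem_map] at h
      obtain ⟨o, ho, r, hr, rfl⟩ := h
      rcases (ih r).1 hr with ⟨hl, hro⟩
      refine ⟨by simp [hl], ?_⟩
      intro o' h'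
      rcases List.mem_cons.1 h' with rfl | h''
      · simpa using ho
      · exact hro o' h''
    · rintro ⟨hl, ho⟩
      match ops with
      | [] => simp at hl
      | o :: r =>
        have hr : r ∈ pvProds k :=
          (ih r).2 ⟨by simpa using hl, fun o' h' => ho o' (List.mem_cons_of_mem _ h')⟩
        have hop := ho o (List.mem_cons_self)
        simp only [pvProds, List.mem_flatMap, List.mem_map]
        exact ⟨o, by simpa using hop, r, hr, rfl⟩

lemma pvEval_eq_chain (a : Int) (rest : List Int) (ops : List String) (t : Int)
    (h : ops.length = rest.length) :
    evaluate_left_to_right (a :: rest) ops t = pvChain a ops rest := by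
  unfold evaluate_left_to_right pvChain
  have hz : (ops.zip rest).length = ops.length := by simp [h]
  have hc : ∀ (result : Int) (i : Int), i ∈ PySem.List.pyRange 0 (ops.length : Int) 1 →
      (if PySem.List.pyGetD ops i "" = "+" then result + PySem.List.pyGetD (a :: rest) (i + 1) 0
       else if PySem.List.pyGetD ops i "" = "*" then result * PySem.List.pyGetD (a :: rest) (i + 1) 0
       else result)
      = pvApply (PySem.List.pyGetD (ops.zip rest) i ("", 0)).1 result
          (PySem.List.pyGetD (ops.zip rest) i ("", 0)).2 := by
    intro result i hi
    rcases (PySem.List.mem_pyRange_one).1 hi with ⟨h0, hlt⟩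
    obtain ⟨k, rfl⟩ : ∃ k : Nat, i = (k : Int) := ⟨i.toNat, by omega⟩
    have hk : k < ops.length := by exact_mod_cast hlt
    have hkr : k < rest.length := h ▸ hk
    have hkz : k < (ops.zip rest).length := by omega
    have e1 : PySem.List.pyGetD ops (k : Int) "" = ops[k] := by
      rw [PySem.List.pyGetD_natCast]; exact List.getD_eq_getElem _ _ hk
    have e2 : PySem.List.pyGetD (a :: rest) ((k : Int) + 1) 0 = rest[k] := by
      have hcast : ((k : Int) + 1) = ((k + 1 : Nat) : Int) := by push_cast; ring
      rw [hcast, PySem.List.pyGetD_natCast]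
      have hlt' : k + 1 < (a :: rest).length := by simp; omega
      rw [List.getD_eq_getElem _ _ hlt']
      simp
    have e3 : PySem.List.pyGetD (ops.zip rest) (k : Int) ("", 0) = (ops[k], rest[k]) := by
      rw [PySem.List.pyGetD_natCast, List.getD_eq_getElem _ _ hkz]
      simp
    rw [e1, e2, e3, pvApply]
  rw [PySem.List.foldl_congr_mem _ _ _ _ hc]
  have hinit : PySem.List.pyGetD (a :: rest) 0 0 = a := by simp [PySem.List.pyGetD_zero]
  rw [hinit]
  rw [← hz]
  exact PySem.List.foldl_pyRange_zero_pyGetD' (ops.zip rest) ("", 0)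
      (fun (r : Int) (p : String × Int) => pvApply p.1 r p.2) a

lemma pvChain_cons (u : Int) (op : String) (ops : List String) (x : Int) (xs : List Int) :
    pvChain u (op :: ops) (x :: xs) = pvChain (pvApply op u x) ops xs := by
  simp [pvChain]

lemma pvMem_step (S : PySem.Set Int) (x v : Int) :
    v ∈ pvStep S x ↔ ∃ u ∈ S, v = u + x ∨ v = u * x := by
  unfold pvStep
  rw [PySem.Set.mem_union]
  simp only [PySem.Set.mem_ofList, List.mem_map]
  constructor
  · rintro (⟨u, hu, rfl⟩ | ⟨u, hu, rfl⟩) <;> exact ⟨u, hu, by simp⟩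
  · rintro ⟨u, hu, rfl | rfl⟩
    · exact Or.inl ⟨u, hu, rfl⟩
    · exact Or.inr ⟨u, hu, rfl⟩

lemma pvMem_foldl_step : ∀ (xs : List Int) (S : PySem.Set Int) (v : Int),
    v ∈ xs.foldl pvStep S ↔
      ∃ u ∈ S, ∃ ops : List String,
        ops.length = xs.length ∧ (∀ o ∈ ops, o = "+" ∨ o = "*") ∧ pvChain u ops xs = v := by
  intro xs
  induction xs with
  | nil =>
    intro S v
    simp only [List.foldl_nil]
    constructor
    · intro h; exact ⟨v, h, [], by simp [pvChain]⟩
    · rintro ⟨u, hu, ops, hl, _, hc⟩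
      have hnil : ops = [] := List.eq_nil_of_length_eq_zero (by simpa using hl)
      subst hnil
      have huv : u = v := by simpa [pvChain] using hc
      exact huv ▸ hu
  | cons x xs ih =>
    intro S v
    simp only [List.foldl_cons]
    rw [ih]
    constructor
    · rintro ⟨u', hu', ops, hl, ho, hc⟩
      rcases (pvMem_step S x u').1 hu' with ⟨u, hu, hs⟩
      rcases hs with rfl | rfl
      · refine ⟨u, hu, "+" :: ops, by simpa using hl, ?_, ?_⟩
        · intro o h'
          rcases List.mem_cons.1 h' with rfl | h''
          · exact Or.inl rfl
          · exact ho o h''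
        · rw [pvChain_cons]; simpa [pvApply] using hc
      · refine ⟨u, hu, "*" :: ops, by simpa using hl, ?_, ?_⟩
        · intro o h'
          rcases List.mem_cons.1 h' with rfl | h''
          · exact Or.inr rfl
          · exact ho o h''
        · rw [pvChain_cons]; simpa [pvApply] using hc
    · rintro ⟨u, hu, ops, hl, ho, hc⟩
      match ops with
      | [] => simp at hl
      | op :: ops =>
        have hop := ho op (List.mem_cons_self)
        refine ⟨pvApply op u x, ?_, ops, by simpa using hl,
          fun o h' => ho o (List.mem_cons_of_mem _ h'), by rw [pvChain_cons] at hc; exact hc⟩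
        rw [pvMem_step]
        rcases hop with rfl | rfl
        · exact ⟨u, hu, Or.inl (by simp [pvApply])⟩
        · exact ⟨u, hu, Or.inr (by simp [pvApply])⟩

lemma pvAdd_idem (s : PySem.Set Int) (t : Int) :
    PySem.Set.add (PySem.Set.add s t) t = PySem.Set.add s t := by
  apply PySem.Set.add_of_mem
  rw [PySem.Set.mem_add]
  exact Or.inr rfl

lemma pvFoldl_if_add : ∀ (L : List (List String)) (s : PySem.Set Int) (t : Int)
    (P : List String → Prop) [DecidablePred P],
    L.foldl (fun s ops => if P ops then PySem.Set.add s t else s) s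
      = if ∃ ops ∈ L, P ops then PySem.Set.add s t else s := by
  intro L
  induction L with
  | nil => intro s t P _; simp
  | cons c L ih =>
    intro s t P _
    simp only [List.foldl_cons]
    by_cases hc : P c
    · rw [if_pos hc, ih]
      by_cases hL : ∃ ops ∈ L, P ops
      · rw [if_pos hL, if_pos ⟨c, List.mem_cons_self, hc⟩, pvAdd_idem]
      · rw [if_neg hL, if_pos ⟨c, List.mem_cons_self, hc⟩]
    · rw [if_neg hc, ih]
      have hiff : (∃ ops ∈ L, P ops) ↔ (∃ ops ∈ c :: L, P ops) := by
        constructor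
        · rintro ⟨o, h1, h2⟩; exact ⟨o, List.mem_cons_of_mem _ h1, h2⟩
        · rintro ⟨o, h1, h2⟩
          rcases List.mem_cons.1 h1 with rfl | h1'
          · exact absurd h2 hc
          · exact ⟨o, h1', h2⟩
      rw [if_congr hiff rfl rfl]

-- the condition A tests for one (total, nums) pair equals the condition B tests
lemma pvPair_cond (total : Int) (a x : Int) (rest : List Int) :
    (∃ ops ∈ pvProds ((x :: rest).length),
        evaluate_left_to_right (a :: x :: rest) ops total = total)
      ↔ total ∈ (x :: rest).foldl pvStep (PySem.Set.ofList [a]) := by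
  rw [pvMem_foldl_step]
  constructor
  · rintro ⟨ops, hmem, heval⟩
    rcases (pvProds_mem _ ops).1 hmem with ⟨hl, ho⟩
    refine ⟨a, by simp [PySem.Set.mem_ofList], ops, by simpa using hl, ho, ?_⟩
    rw [pvEval_eq_chain a (x :: rest) ops total (by simpa using hl)] at heval
    exact heval
  · rintro ⟨u, hu, ops, hl, ho, hc⟩
    have hua : u = a := by simpa [PySem.Set.mem_ofList] using hu
    subst hua
    refine ⟨ops, (pvProds_mem _ ops).2 ⟨by simpa using hl, ho⟩, ?_⟩
    rw [pvEval_eq_chain u (x :: rest) ops total (by simpa using hl)]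
    exact hc

lemma pvPair_eq (s : PySem.Set Int) (pr : Int × List Int) :
    (build_operators_list pr.2).foldl
        (fun s operators =>
          if evaluate_left_to_right pr.2 operators pr.1 = pr.1
          then PySem.Set.add s pr.1 else s) s
      = (match pr.2 with
         | a :: x :: rest =>
             if ((x :: rest).foldl pvStep (PySem.Set.ofList [a])).contains pr.1
             then PySem.Set.add s pr.1 else s
         | _ => s) := by
  obtain ⟨total, nums⟩ := pr
  rcases nums with _ | ⟨a, _ | ⟨x, rest⟩⟩
  · simp [build_operators_list]
  · simp [build_operators_list]
  · simp only
    have hb : build_operators_list (a :: x :: rest) = pvProds ((x :: rest).length) := by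
      simp [build_operators_list]
    rw [hb, pvFoldl_if_add]
    have hiff : (∃ ops ∈ pvProds ((x :: rest).length),
        evaluate_left_to_right (a :: x :: rest) ops total = total)
        ↔ (((x :: rest).foldl pvStep (PySem.Set.ofList [a])).contains total = true) := by
      rw [PySem.Set.contains_iff]
      exact pvPair_cond total a x rest
    rw [if_congr hiff rfl rfl]

-- ===== VERDICT (by name: the statement is the Claim_ definition above) =====
theorem create_set_of_totals_spec : Claim_equal_create_set_of_totals := by
  intro one_to_many _
  unfold Spec_create_set_of_totals create_set_of_totals create_set_of_totals_alt
  apply PySem.List.foldl_congr_mem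
  intro acc pr _
  simpa using pvPair_eq acc pr
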